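-- pv_equiv track=rewrite | github.com/cianc/AoC2025 | day04.py | count_and_remove_accessible_rolls
-- ===== SOURCE A (Python) =====
-- import itertools
-- from typing import List, Tuple
--
-- DELTAS = list(itertools.product((-1, 0, 1), repeat=2))
--
-- def count_and_remove_accessible_rolls(warehouse: List[List[str]], rolls: List[Tuple[int, int]]) -> Tuple[int, List[List[str]], List[Tuple[int, int]]]:
--     rolls_to_remove = []
--     max_row_index = len(warehouse) - 1
--     num_col_index = len(warehouse[0]) - 1
--
--     for roll in rolls:
--         row_index, col_index = roll
--
--         other_rolls_count = 0
--         for row_delta, col_delta in DELTAS: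
--             new_row_index = row_index + row_delta
--             new_col_index = col_index + col_delta
--
--             if not (0 <= new_row_index <= max_row_index and 0 <= new_col_index <= num_col_index):
--                 continue
--             if warehouse[new_row_index][new_col_index] == '@':
--                 other_rolls_count += 1
--                 if other_rolls_count >= 4:
--                     break
--
--         if other_rolls_count < 4:
--             rolls_to_remove.append(roll)
--
--     if not rolls_to_remove:
--         return 0, warehouse, rolls
--
--     for row_index, col_index in rolls_to_remove:
--         warehouse[row_index][col_index] = '.'
--
--     rolls_to_remove_set = set(rolls_to_remove)
--     new_rolls = [roll for roll in rolls if roll not in rolls_to_remove_set]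
--
--     return len(rolls_to_remove), warehouse, new_rolls
-- ===== SOURCE B (Python) =====
-- import itertools
-- from typing import List, Tuple
--
-- DELTAS = list(itertools.product((-1, 0, 1), repeat=2))
--
-- def count_and_remove_accessible_rolls(warehouse: List[List[str]], rolls: List[Tuple[int, int]]) -> Tuple[int, List[List[str]], List[Tuple[int, int]]]:
--     # Build a neighbor-count table in one pass over the grid: every '@' cell
--     # contributes 1 to each of the 9 cells of its 3x3 neighborhood.
--     counts = {}
--     for row_index, row in enumerate(warehouse):
--         for col_index, cell in enumerate(row):
--             if cell == '@':
--                 for row_delta, col_delta in DELTAS: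
--                     key = (row_index + row_delta, col_index + col_delta)
--                     counts[key] = counts.get(key, 0) + 1
--
--     rolls_to_remove = [roll for roll in rolls if counts.get(roll, 0) < 4]
--
--     if not rolls_to_remove:
--         return 0, warehouse, rolls
--
--     for row_index, col_index in rolls_to_remove:
--         warehouse[row_index][col_index] = '.'
--
--     rolls_to_remove_set = set(rolls_to_remove)
--     new_rolls = [roll for roll in rolls if roll not in rolls_to_remove_set]
--
--     return len(rolls_to_remove), warehouse, new_rolls
-- ===== Notes on version B (the rewrite author's own statement) =====
-- stated objective: alternative
-- what changed: A rescans the 3x3 neighborhood of every roll (9 bounds-checked grid probes per roll); B instead makes one pass over the grid, scattering each '@' cell into a dict-based neighbor-count table, and each roll is then decided by a single table lookup; it trades per-roll probing for a precomputed table.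
import Mathlib
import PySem

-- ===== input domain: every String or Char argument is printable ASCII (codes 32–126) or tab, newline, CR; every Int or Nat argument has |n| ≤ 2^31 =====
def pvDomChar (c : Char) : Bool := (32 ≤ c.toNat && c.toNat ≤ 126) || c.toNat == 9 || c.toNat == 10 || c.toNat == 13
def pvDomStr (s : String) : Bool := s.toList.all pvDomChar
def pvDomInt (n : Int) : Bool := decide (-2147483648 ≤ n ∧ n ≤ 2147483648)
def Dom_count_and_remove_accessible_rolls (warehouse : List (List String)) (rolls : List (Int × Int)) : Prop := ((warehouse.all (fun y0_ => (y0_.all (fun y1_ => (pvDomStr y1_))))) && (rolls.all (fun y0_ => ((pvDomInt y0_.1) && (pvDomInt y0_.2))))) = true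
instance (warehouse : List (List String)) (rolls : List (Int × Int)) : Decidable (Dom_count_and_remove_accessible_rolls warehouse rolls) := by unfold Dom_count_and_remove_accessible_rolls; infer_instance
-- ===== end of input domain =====

-- B replaces A's per-roll 3x3 rescan by one scatter pass building a neighbor-count
-- table that each roll then looks up (objective: alternative decomposition); both
-- Pythons mutate `warehouse` in place the same way; theorems are about the return value.

-- ===== PORT A =====
-- DELTAS = list(itertools.product((-1, 0, 1), repeat=2))
def pvDeltas : List (Int × Int) :=
  [(-1,-1),(-1,0),(-1,1),(0,-1),(0,0),(0,1),(1,-1),(1,0),(1,1)]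

-- warehouse[row_index][col_index] = '.' with Python's negative-index wraparound —
-- exact for -len ≤ index < len, which Pre_ guarantees for every roll
def pvSetCell (g : List (List String)) (r c : Int) : List (List String) :=
  let ri := if r < 0 then r + (g.length : Int) else r
  g.modify ri.toNat (fun row =>
    let ci := if c < 0 then c + (row.length : Int) else c
    row.set ci.toNat ".")

-- the identical tail both Pythons end with: early return, mutation, set filter
def pvFinish (warehouse : List (List String)) (rolls rollsToRemove : List (Int × Int)) :
    Int × List (List String) × (List (Int × Int)) :=
  if rollsToRemove = [] then (0, warehouse, rolls)
  else
    let wh := rollsToRemove.foldl (fun g roll => pvSetCell g roll.1 roll.2) warehouse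
    let remSet : PySem.Set (Int × Int) := PySem.Set.ofList rollsToRemove
    let newRolls := rolls.filter (fun roll => !(PySem.Set.contains remSet roll))
    ((rollsToRemove.length : Int), wh, newRolls)

-- A's inner 'for row_delta, col_delta in DELTAS' loop, with the early break at 4
def pvALoop (g : List (List String)) (maxRow numCol r c : Int) :
    List (Int × Int) → Int → Int
  | [], acc => acc
  | d :: rest, acc =>
    if ¬ (0 ≤ r + d.1 ∧ r + d.1 ≤ maxRow ∧ 0 ≤ c + d.2 ∧ c + d.2 ≤ numCol) then
      pvALoop g maxRow numCol r c rest acc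
    else if (g.getD (r + d.1).toNat []).getD (c + d.2).toNat "" = "@" then
      (if acc + 1 ≥ 4 then acc + 1 else pvALoop g maxRow numCol r c rest (acc + 1))
    else pvALoop g maxRow numCol r c rest acc

def count_and_remove_accessible_rolls (warehouse : List (List String)) (rolls : List (Int × Int)) :
    Int × List (List String) × (List (Int × Int)) :=
  let maxRowIndex : Int := (warehouse.length : Int) - 1
  let numColIndex : Int := ((warehouse.headD []).length : Int) - 1
  let rollsToRemove := rolls.foldl (fun acc roll =>
    if pvALoop warehouse maxRowIndex numColIndex roll.1 roll.2 pvDeltas 0 < 4 then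
      acc ++ [roll]
    else acc) []
  pvFinish warehouse rolls rollsToRemove

-- ===== PORT B =====
-- counts[(i + dr, j + dc)] = counts.get(.., 0) + 1 for every '@' cell (i, j), every delta
def pvBCounts (warehouse : List (List String)) : PySem.Dict (Int × Int) Int :=
  (PySem.List.enumerate warehouse 0).foldl (fun d p =>
    (PySem.List.enumerate p.2 0).foldl (fun d q =>
      if q.2 = "@" then
        pvDeltas.foldl (fun d dd => d.modify (p.1 + dd.1, q.1 + dd.2) 0 (· + 1)) d
      else d) d) PySem.Dict.empty

def count_and_remove_accessible_rolls_alt (warehouse : List (List String)) (rolls : List (Int × Int)) :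
    Int × List (List String) × (List (Int × Int)) :=
  let counts := pvBCounts warehouse
  let rollsToRemove := rolls.filter (fun roll => decide (counts.getD roll 0 < 4))
  pvFinish warehouse rolls rollsToRemove

-- ===== PRECONDITION & SPEC =====
-- Pre_ is the natural domain: a nonempty grid and, when there are rolls, a
-- rectangular grid with every roll at a Python-valid (possibly negative,
-- wrapping) index.  Outside it A raises IndexError (empty grid, rows shorter
-- than row 0 being scanned, roll indices past Python's wraparound range), except
-- on ragged grids whose later rows are LONGER than row 0, where A's neighbor
-- scan accidentally ignores the columns past row 0's width while B counts them.
def Pre_count_and_remove_accessible_rolls (warehouse : List (List String)) (rolls : List (Int × Int)) : Prop :=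
  warehouse ≠ [] ∧
  (rolls = [] ∨
    ((∀ row ∈ warehouse, row.length = (warehouse.headD []).length) ∧
     (∀ roll ∈ rolls,
        -(warehouse.length : Int) ≤ roll.1 ∧ roll.1 < (warehouse.length : Int) ∧
        -((warehouse.headD []).length : Int) ≤ roll.2 ∧
          roll.2 < ((warehouse.headD []).length : Int))))
instance (warehouse : List (List String)) (rolls : List (Int × Int)) : Decidable (Pre_count_and_remove_accessible_rolls warehouse rolls) := by unfold Pre_count_and_remove_accessible_rolls; infer_instance

def pvWitness_count_and_remove_accessible_rolls : List (List String) × (List (Int × Int)) :=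
  ([["@", "@"], ["@", "@"]], [(0, 0), (1, 1)])

def Spec_count_and_remove_accessible_rolls (warehouse : List (List String)) (rolls : List (Int × Int)) (out : Int × List (List String) × (List (Int × Int))) : Prop := out = count_and_remove_accessible_rolls_alt warehouse rolls
instance (warehouse : List (List String)) (rolls : List (Int × Int)) (out : Int × List (List String) × (List (Int × Int))) : Decidable (Spec_count_and_remove_accessible_rolls warehouse rolls out) := by unfold Spec_count_and_remove_accessible_rolls; infer_instance

-- ===== CLAIM (what is proved, stated in full; the proofs are below) =====
def Claim_equal_count_and_remove_accessible_rolls : Prop := ∀ (warehouse : List (List String)) (rolls : List (Int × Int)), Dom_count_and_remove_accessible_rolls warehouse rolls → Pre_count_and_remove_accessible_rolls warehouse rolls → Spec_count_and_remove_accessible_rolls warehouse rolls (count_and_remove_accessible_rolls warehouse rolls)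

-- ===== LEMMAS AND PROOFS =====

-- the Bool test A's inner loop applies at one cell / one delta
def pvCb (g : List (List String)) (a b : Int) : Bool :=
  decide (0 ≤ a ∧ a ≤ (g.length : Int) - 1 ∧ 0 ≤ b ∧ b ≤ ((g.headD []).length : Int) - 1) &&
  decide ((g.getD a.toNat []).getD b.toNat "" = "@")

def pvPb (g : List (List String)) (r c : Int) (d : Int × Int) : Bool :=
  pvCb g (r + d.1) (c + d.2)

-- the multiset of keys B's scatter pass increments, and the '@' positions
def pvKeys (g : List (List String)) : List (Int × Int) :=
  (PySem.List.enumerate g 0).flatMap (fun p =>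
    (PySem.List.enumerate p.2 0).flatMap (fun q =>
      if q.2 = "@" then pvDeltas.map (fun dd => (p.1 + dd.1, q.1 + dd.2)) else []))

def pvAt (g : List (List String)) : List (Int × Int) :=
  (PySem.List.enumerate g 0).flatMap (fun p =>
    (PySem.List.enumerate p.2 0).flatMap (fun q =>
      if q.2 = "@" then [(p.1, q.1)] else []))

-- (A side) the break loop computes min(acc + #hits, 4)
theorem pvALoop_eq_min (g : List (List String)) (r c : Int) :
    ∀ (ds : List (Int × Int)) (acc : Int), acc < 4 →
      pvALoop g (g.length - 1) (((g.headD []).length : Int) - 1) r c ds acc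
        = min (acc + (ds.countP (pvPb g r c) : Int)) 4 := by
  intro ds
  induction ds with
  | nil => intro acc h; simp only [pvALoop, List.countP_nil]; omega
  | cons d rest ih =>
    intro acc h
    have hcnt : (0 : Int) ≤ (rest.countP (pvPb g r c) : Int) := by positivity
    simp only [pvALoop, List.countP_cons]
    by_cases hb : (0 ≤ r + d.1 ∧ r + d.1 ≤ (g.length : Int) - 1 ∧ 0 ≤ c + d.2 ∧
        c + d.2 ≤ ((g.headD []).length : Int) - 1)
    · rw [if_neg (not_not_intro hb)]
      by_cases hc : (g.getD (r + d.1).toNat []).getD (c + d.2).toNat "" = "@"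
      · have hpb : pvPb g r c d = true := by
          unfold pvPb pvCb; rw [decide_eq_true hb, decide_eq_true hc, Bool.and_self]
        rw [if_pos hc, hpb, if_pos rfl]
        by_cases h4 : acc + 1 ≥ 4
        · rw [if_pos h4]; push_cast; omega
        · rw [if_neg h4, ih (acc + 1) (by omega)]; push_cast; omega
      · have hpb : pvPb g r c d = false := by
          unfold pvPb pvCb; rw [decide_eq_false hc, Bool.and_false]
        rw [if_neg hc, hpb, ih acc h]
        push_cast; omega
    · rw [if_pos hb]
      have hpb : pvPb g r c d = false := by
        simp only [pvPb, pvCb, Bool.and_eq_false_iff, decide_eq_false_iff_not]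
        exact Or.inl hb
      rw [hpb, ih acc h]
      push_cast; omega

-- pvKeys is pvAt scattered through the 9 deltas
theorem pvKeys_eq (g : List (List String)) :
    pvKeys g = (pvAt g).flatMap (fun p => pvDeltas.map (fun dd => (p.1 + dd.1, p.2 + dd.2))) := by
  unfold pvKeys pvAt
  rw [List.flatMap_assoc]
  refine congrFun (congrArg _ (funext fun p => ?_)) _
  rw [List.flatMap_assoc]
  refine congrFun (congrArg _ (funext fun q => ?_)) _
  by_cases h : q.2 = "@" <;> simp [h]

theorem count_flatMap' {α β : Type} [BEq β] (l : List α) (f : α → List β) (v : β) :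
    (l.flatMap f).count v = (l.map (fun x => (f x).count v)).sum := by
  rw [List.flatMap_def, List.count_flatten, List.map_map]
  rfl

-- count of a shifted delta list
theorem count_map_shift (p : Int × Int) (r c : Int) :
    (pvDeltas.map (fun dd => (p.1 + dd.1, p.2 + dd.2))).count (r, c)
      = pvDeltas.count (r - p.1, c - p.2) := by
  have hinj : Function.Injective (fun dd : Int × Int => (p.1 + dd.1, p.2 + dd.2)) := by
    intro x y h
    simp only [Prod.mk.injEq] at h
    exact Prod.ext (by omega) (by omega)
  have : (r, c) = (fun dd : Int × Int => (p.1 + dd.1, p.2 + dd.2)) (r - p.1, c - p.2) := by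
    simp
  rw [this, List.count_map_of_injective _ _ hinj]

-- double-counting exchange
theorem count_exchange (L D : List (Int × Int)) (r c : Int) :
    (L.map (fun p => D.count (r - p.1, c - p.2))).sum
      = (D.map (fun d => L.count (r - d.1, c - d.2))).sum := by
  induction L with
  | nil => simp
  | cons p L' ih =>
    simp only [List.map_cons, List.sum_cons, ih]
    have hcnt : ∀ d : Int × Int, (p :: L').count (r - d.1, c - d.2)
        = L'.count (r - d.1, c - d.2) + (if p == (r - d.1, c - d.2) then 1 else 0) := by
      intro d
      rw [List.count_cons]
    calc D.count (r - p.1, c - p.2) + (D.map (fun d => L'.count (r - d.1, c - d.2))).sum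
        = (D.map (fun d => L'.count (r - d.1, c - d.2))).sum
            + (D.map (fun d => if p == (r - d.1, c - d.2) then 1 else 0)).sum := by
          have : (D.map (fun d => if p == (r - d.1, c - d.2) then 1 else 0)).sum
              = D.countP (fun d => p == (r - d.1, c - d.2)) :=
            PySem.List.sum_map_ite_one_zero_nat _ D
          rw [this]
          have : D.countP (fun d => p == (r - d.1, c - d.2)) = D.count (r - p.1, c - p.2) := by
            rw [List.count]
            refine List.countP_congr fun d _ => ?_
            simp only [beq_iff_eq, Prod.ext_iff]
            constructor
            · rintro ⟨h1, h2⟩; exact ⟨by omega, by omega⟩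
            · rintro ⟨h1, h2⟩; exact ⟨by omega, by omega⟩
          rw [this]; omega
      _ = (D.map (fun d => (p :: L').count (r - d.1, c - d.2))).sum := by
          rw [← List.sum_map_add]
          refine congrArg _ (List.map_congr_left fun d _ => ?_)
          rw [hcnt d]

-- reflecting the offsets through the (symmetric) delta list
theorem sum_pvDeltas_reflect (r c : Int) (f : Int → Int → Nat) :
    (pvDeltas.map (fun d => f (r - d.1) (c - d.2))).sum
      = (pvDeltas.map (fun d => f (r + d.1) (c + d.2))).sum := by
  have e1 : ∀ x : Int, x - -1 = x + 1 := fun x => by ring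
  have e2 : ∀ x : Int, x - 0 = x := fun x => by ring
  have e3 : ∀ x : Int, x + 0 = x := fun x => by ring
  have e4 : ∀ x : Int, x + -1 = x - 1 := fun x => by ring
  simp only [pvDeltas, List.map_cons, List.map_nil, List.sum_cons, List.sum_nil, e1, e2, e3, e4]
  ac_rfl

-- counting one '@' position row-wise
theorem count_rowF (pi a b : Int) : ∀ (row : List String) (t : Int),
    ((PySem.List.enumerate row t).flatMap (fun q => if q.2 = "@" then [(pi, q.1)] else [])).count (a, b)
      = if a = pi ∧ t ≤ b ∧ b < t + (row.length : Int) ∧ row.getD (b - t).toNat "" = "@" then 1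
        else 0 := by
  intro row
  induction row with
  | nil =>
    intro t
    rw [if_neg (by rintro ⟨-, h1, h2, -⟩; simp at h2; omega)]
    simp [PySem.List.enumerate]
  | cons cell rest ih =>
    intro t
    rw [PySem.List.enumerate_cons, List.flatMap_cons, List.count_append, ih (t + 1)]
    rcases lt_trichotomy b t with hbt | hbt | hbt
    · have hb : ((pi, t) == (a, b)) = false := by simp; omega
      have hhead : List.count (a, b) (if cell = "@" then [(pi, t)] else []) = 0 := by
        by_cases hc : cell = "@"
        · rw [if_pos hc, List.count_singleton, hb]; simp
        · rw [if_neg hc, List.count_nil]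
      rw [hhead, if_neg (by rintro ⟨-, h, -, -⟩; omega),
          if_neg (by rintro ⟨-, h, -, -⟩; omega)]
    · subst hbt
      rw [show b - b = (0 : Int) from by omega]
      simp only [Int.toNat_zero, List.getD_cons_zero]
      by_cases hc : cell = "@"
      · by_cases ha : a = pi
        · have hhead : List.count (a, b) (if cell = "@" then [(pi, b)] else []) = 1 := by
            simp [hc, ha]
          rw [hhead, if_neg (by rintro ⟨-, h, -, -⟩; omega),
              if_pos ⟨ha, by omega, by simp only [List.length_cons]; push_cast; omega, hc⟩]
        · have hb : ((pi, b) == (a, b)) = false := by simp; omega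
          have hhead : List.count (a, b) (if cell = "@" then [(pi, b)] else []) = 0 := by
            rw [if_pos hc, List.count_singleton, hb]; simp
          rw [hhead, if_neg (by rintro ⟨-, h, -, -⟩; omega),
              if_neg (by rintro ⟨h, -, -, -⟩; exact ha h)]
      · have hhead : List.count (a, b) (if cell = "@" then [(pi, b)] else []) = 0 := by
          simp [hc]
        rw [hhead, if_neg (by rintro ⟨-, h, -, -⟩; omega),
            if_neg (by rintro ⟨-, -, -, h⟩; exact hc h)]
    · rw [show (b - t).toNat = (b - (t + 1)).toNat + 1 from by omega, List.getD_cons_succ]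
      have hb : ((pi, t) == (a, b)) = false := by simp; omega
      have hhead : List.count (a, b) (if cell = "@" then [(pi, t)] else []) = 0 := by
        by_cases hc : cell = "@"
        · rw [if_pos hc, List.count_singleton, hb]; simp
        · rw [if_neg hc, List.count_nil]
      rw [hhead]
      by_cases ha : a = pi
      · by_cases hX : rest.getD (b - (t + 1)).toNat "" = "@"
        · by_cases hlen : b < t + 1 + (rest.length : Int)
          · rw [if_pos ⟨ha, by omega, hlen, hX⟩,
                if_pos ⟨ha, by omega, by simp only [List.length_cons]; push_cast; omega, hX⟩]
          · rw [if_neg (by rintro ⟨-, -, h, -⟩; omega),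
                if_neg (by rintro ⟨-, -, h, -⟩; simp only [List.length_cons] at h; push_cast at h; omega)]
        · rw [if_neg (by rintro ⟨-, -, -, h⟩; exact hX h),
              if_neg (by rintro ⟨-, -, -, h⟩; exact hX h)]
      · rw [if_neg (by rintro ⟨h, -, -, -⟩; exact ha h),
            if_neg (by rintro ⟨h, -, -, -⟩; exact ha h)]

-- counting one '@' position grid-wise
theorem count_gridF (a b : Int) : ∀ (g : List (List String)) (s : Int),
    ((PySem.List.enumerate g s).flatMap (fun p =>
      (PySem.List.enumerate p.2 0).flatMap (fun q => if q.2 = "@" then [(p.1, q.1)] else []))).count (a, b)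
      = if s ≤ a ∧ a < s + (g.length : Int) ∧ 0 ≤ b ∧ b < ((g.getD (a - s).toNat []).length : Int)
          ∧ (g.getD (a - s).toNat []).getD b.toNat "" = "@" then 1 else 0 := by
  intro g
  induction g with
  | nil =>
    intro s
    rw [if_neg (by rintro ⟨h1, h2, -, -, -⟩; simp at h2; omega)]
    simp [PySem.List.enumerate]
  | cons row rest ih =>
    intro s
    rw [PySem.List.enumerate_cons, List.flatMap_cons, List.count_append, ih (s + 1),
        count_rowF s a b row 0, show b - (0 : Int) = b from by omega]
    rcases lt_trichotomy a s with has | has | has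
    · rw [if_neg (by rintro ⟨h, -, -, -⟩; omega),
          if_neg (by rintro ⟨h, -, -, -, -⟩; omega),
          if_neg (by rintro ⟨h, -, -, -, -⟩; omega)]
    · subst has
      rw [show a - a = (0 : Int) from by omega]
      simp only [Int.toNat_zero, List.getD_cons_zero]
      by_cases h : 0 ≤ b ∧ b < ((row.length : Int)) ∧ row.getD b.toNat "" = "@"
      · rw [if_pos ⟨by trivial, h.1, by omega, h.2.2⟩,
            if_neg (by rintro ⟨hh, -, -, -, -⟩; omega),
            if_pos ⟨by omega, by simp only [List.length_cons]; push_cast; omega, h.1, h.2.1, h.2.2⟩]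
      · rw [if_neg (by rintro ⟨-, h1, h2, h3⟩; exact h ⟨h1, by omega, h3⟩),
            if_neg (by rintro ⟨hh, -, -, -, -⟩; omega),
            if_neg (by rintro ⟨-, -, h1, h2, h3⟩; exact h ⟨h1, h2, h3⟩)]
    · rw [if_neg (by rintro ⟨h, -, -, -⟩; omega),
          show (a - s).toNat = (a - (s + 1)).toNat + 1 from by omega]
      simp only [List.getD_cons_succ]
      by_cases hlen : a < s + 1 + (rest.length : Int)
      · by_cases h : 0 ≤ b ∧ b < ((rest.getD (a - (s + 1)).toNat []).length : Int)
            ∧ (rest.getD (a - (s + 1)).toNat []).getD b.toNat "" = "@"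
        · rw [if_pos ⟨by omega, hlen, h.1, h.2.1, h.2.2⟩,
              if_pos ⟨by omega, by simp only [List.length_cons]; push_cast; omega, h.1, h.2.1, h.2.2⟩]
        · rw [if_neg (by rintro ⟨-, -, h1, h2, h3⟩; exact h ⟨h1, h2, h3⟩),
              if_neg (by rintro ⟨-, -, h1, h2, h3⟩; exact h ⟨h1, h2, h3⟩)]
      · rw [if_neg (by rintro ⟨-, hh, -, -, -⟩; omega),
            if_neg (by rintro ⟨-, hh, -, -, -⟩; simp only [List.length_cons] at hh; push_cast at hh; omega)]

-- the '@' positions, counted through pvCb (rectangular grids)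
theorem count_pvAt (g : List (List String))
    (hrect : ∀ row ∈ g, row.length = (g.headD []).length) (a b : Int) :
    (pvAt g).count (a, b) = if pvCb g a b then 1 else 0 := by
  unfold pvAt
  rw [count_gridF a b g 0, show a - (0 : Int) = a from by omega]
  simp only [pvCb, Bool.and_eq_true, decide_eq_true_eq]
  have hlen : 0 ≤ a → a < (g.length : Int) →
      ((g.getD a.toNat []).length : Int) = ((g.headD []).length : Int) := by
    intro h1 h2
    have hn : a.toNat < g.length := by omega
    have hg : g.getD a.toNat [] = g[a.toNat] := by
      simp [List.getD_eq_getElem?_getD, List.getElem?_eq_getElem hn]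
    rw [hg, hrect g[a.toNat] (List.getElem_mem hn)]
  refine if_congr ?_ rfl rfl
  constructor
  · rintro ⟨h1, h2, h3, h4, h5⟩
    have hW := hlen h1 (by omega)
    exact ⟨⟨h1, by omega, h3, by omega⟩, h5⟩
  · rintro ⟨⟨h1, h2, h3, h4⟩, h5⟩
    have hW := hlen h1 (by omega)
    exact ⟨h1, by omega, h3, by omega, h5⟩

theorem count_pvKeys (g : List (List String))
    (hrect : ∀ row ∈ g, row.length = (g.headD []).length) (r c : Int) :
    (pvKeys g).count (r, c) = pvDeltas.countP (pvPb g r c) := by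
  rw [pvKeys_eq, count_flatMap']
  rw [List.map_congr_left (fun p _ => count_map_shift p r c)]
  rw [count_exchange (pvAt g) pvDeltas r c]
  rw [sum_pvDeltas_reflect r c (fun x y => (pvAt g).count (x, y))]
  rw [List.map_congr_left (fun d _ => count_pvAt g hrect (r + d.1) (c + d.2))]
  rw [PySem.List.sum_map_ite_one_zero_nat (fun d => pvCb g (r + d.1) (c + d.2)) pvDeltas]
  rfl

-- B's dict lookup is a multiset count over pvKeys
theorem getD_pvBCounts (g : List (List String)) (v : Int × Int) :
    (pvBCounts g).getD v 0 = ((pvKeys g).count v : Int) := by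
  have hfuse : pvBCounts g
      = (pvKeys g).foldl (fun d k => d.modify k 0 (· + 1)) PySem.Dict.empty := by
    unfold pvBCounts pvKeys
    rw [List.foldl_flatMap]
    refine PySem.List.foldl_congr_mem _ _ _ _ ?_
    intro d p _
    rw [List.foldl_flatMap]
    refine PySem.List.foldl_congr_mem _ _ _ _ ?_
    intro d q _
    by_cases h : q.2 = "@"
    · rw [if_pos h, if_pos h, List.foldl_map]
    · rw [if_neg h, if_neg h, List.foldl_nil]
  rw [hfuse, PySem.Dict.getD_foldl_modify_add_one, PySem.Dict.getD_empty, zero_add]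

-- the pointwise agreement of the two removal tests
theorem pointwise_key (g : List (List String))
    (hrect : ∀ row ∈ g, row.length = (g.headD []).length) (r c : Int) :
    decide (pvALoop g ((g.length : Int) - 1) (((g.headD []).length : Int) - 1) r c pvDeltas 0 < 4)
      = decide ((pvBCounts g).getD (r, c) 0 < 4) := by
  rw [pvALoop_eq_min g r c pvDeltas 0 (by norm_num), zero_add,
      getD_pvBCounts g (r, c), count_pvKeys g hrect r c, decide_eq_decide]
  omega

-- ===== VERDICT (by name: the statement is the Claim_ definition above) =====
theorem count_and_remove_accessible_rolls_spec : Claim_equal_count_and_remove_accessible_rolls := by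
  intro warehouse rolls _hdom hpre
  obtain ⟨-, hcase⟩ := hpre
  rcases hcase with hnil | ⟨hrect, -⟩
  · subst hnil; rfl
  unfold Spec_count_and_remove_accessible_rolls
  show pvFinish warehouse rolls
      (rolls.foldl (fun acc roll =>
        if pvALoop warehouse ((warehouse.length : Int) - 1)
            (((warehouse.headD []).length : Int) - 1) roll.1 roll.2 pvDeltas 0 < 4 then
          acc ++ [roll]
        else acc) [])
    = pvFinish warehouse rolls
        (rolls.filter (fun roll => decide ((pvBCounts warehouse).getD roll 0 < 4)))
  refine congrArg (pvFinish warehouse rolls) ?_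
  rw [PySem.List.foldl_append_ite_eq_filter
        (p := fun roll : Int × Int => pvALoop warehouse ((warehouse.length : Int) - 1)
          (((warehouse.headD []).length : Int) - 1) roll.1 roll.2 pvDeltas 0 < 4),
      List.nil_append]
  refine List.filter_congr ?_
  intro roll _
  exact pointwise_key warehouse hrect roll.1 roll.2
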